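-- pv_equiv track=rewrite | github.com/Nico-Oz-ops/ITS_Python | Esercizi_Vari/Esercizio_Recupero/Vari/Esercizio_22.py | analyze_even_odd
-- ===== SOURCE A (Python) =====
-- def analyze_even_odd(nums: list[int]) -> dict[str, int | None]:
--     if not nums:
--         raise ValueError("Lista vuota")
--
--     num_par_piccolo = None
--     num_disp_grande = None
--     count_par = 0
--     count_dispar = 0
--     my_dict = {}
--
--     for num in nums:
--         if num % 2 == 0:
--             count_par += 1
--             if num_par_piccolo is None or num < num_par_piccolo:
--                 num_par_piccolo = num
--
--         else:
--             count_dispar += 1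
--             if num_disp_grande is None or num > num_disp_grande:
--                 num_disp_grande = num
--
--     my_dict["numero pari più piccolo"] = num_par_piccolo
--     my_dict["numero dispari più grande"] = num_disp_grande
--     my_dict["totale numeri pari"] = count_par
--     my_dict["totale numeri dispari"] = count_dispar
--
--     return my_dict
-- ===== SOURCE B (Python) =====
-- def analyze_even_odd(nums: list[int]) -> dict[str, int | None]:
--     if not nums:
--         raise ValueError("Lista vuota")
--     evens = [x for x in nums if x % 2 == 0]
--     odds = [x for x in nums if x % 2 != 0]
--     return {
--         "numero pari più piccolo": min(evens) if evens else None,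
--         "numero dispari più grande": max(odds) if odds else None,
--         "totale numeri pari": len(evens),
--         "totale numeri dispari": len(odds),
--     }
-- ===== Notes on version B (the rewrite author's own statement) =====
-- stated objective: simpler
-- what changed: Replaces the single stateful branching pass (running min/max/counters) with a partition into evens/odds by comprehensions followed by min/max/len reductions and a dict literal.
import Mathlib
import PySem

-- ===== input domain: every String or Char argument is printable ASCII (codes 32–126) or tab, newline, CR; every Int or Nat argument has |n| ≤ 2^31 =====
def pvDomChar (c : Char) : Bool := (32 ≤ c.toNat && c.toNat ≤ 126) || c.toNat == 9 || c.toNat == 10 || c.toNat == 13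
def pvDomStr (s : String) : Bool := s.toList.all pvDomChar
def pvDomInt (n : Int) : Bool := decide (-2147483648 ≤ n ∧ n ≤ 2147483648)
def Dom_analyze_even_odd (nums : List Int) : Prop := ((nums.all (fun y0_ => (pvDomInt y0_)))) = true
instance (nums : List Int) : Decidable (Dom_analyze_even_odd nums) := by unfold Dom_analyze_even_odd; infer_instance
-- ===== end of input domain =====

-- B replaces A's single stateful branching pass by a partition-then-reduce decomposition
-- (filter evens/odds, then min/max/length); objective: simpler. Return-value equivalence on
-- nonempty lists; both raise ValueError on [].

-- ===== PORT A =====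
-- one step of A's for-loop over the state (num_par_piccolo, num_disp_grande, count_par, count_dispar)
def aStep (s : Option Int × Option Int × Int × Int) (num : Int) :
    Option Int × Option Int × Int × Int :=
  match s with
  | (pe, po, cp, cd) =>
    if PySem.Int.mod num 2 == 0 then
      let cp := cp + 1
      let pe := match pe with
        | none => some num
        | some m => if num < m then some num else some m
      (pe, po, cp, cd)
    else
      let cd := cd + 1
      let po := match po with
        | none => some num
        | some m => if num > m then some num else some m
      (pe, po, cp, cd)

def analyze_even_odd (nums : List Int) : List (String × Option Int) :=
  -- 'if not nums: raise ValueError' — the empty list is excluded by Pre_; the port returns [] there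
  if nums = [] then []
  else
    let st := nums.foldl aStep (none, none, 0, 0)
    -- the four dict insertions, in order, on the empty dict
    [("numero pari più piccolo", st.1),
     ("numero dispari più grande", st.2.1),
     ("totale numeri pari", some st.2.2.1),
     ("totale numeri dispari", some st.2.2.2)]

-- ===== PORT B =====
def analyze_even_odd_alt (nums : List Int) : List (String × Option Int) :=
  if nums = [] then []   -- ValueError in Python B as well; excluded by Pre_
  else
    let evens := nums.filter (fun x => PySem.Int.mod x 2 == 0)
    let odds := nums.filter (fun x => !(PySem.Int.mod x 2 == 0))
    [("numero pari più piccolo", PySem.List.min? evens (fun x => x)),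
     ("numero dispari più grande", PySem.List.max? odds (fun x => x)),
     ("totale numeri pari", some (evens.length : Int)),
     ("totale numeri dispari", some (odds.length : Int))]

-- ===== PRECONDITION & SPEC =====
-- Pre_ excludes exactly the empty list, on which both Pythons raise ValueError("Lista vuota").
def Pre_analyze_even_odd (nums : List Int) : Prop := nums ≠ []
instance (nums : List Int) : Decidable (Pre_analyze_even_odd nums) := by
  unfold Pre_analyze_even_odd; infer_instance

def pvWitness_analyze_even_odd : List Int := [3, 8, -2, 7]

def Spec_analyze_even_odd (nums : List Int) (out : List (String × Option Int)) : Prop :=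
  out = analyze_even_odd_alt nums
instance (nums : List Int) (out : List (String × Option Int)) :
    Decidable (Spec_analyze_even_odd nums out) := by unfold Spec_analyze_even_odd; infer_instance

-- ===== CLAIM (what is proved, stated in full; the proofs are below) =====
def Claim_equal_analyze_even_odd : Prop :=
  ∀ (nums : List Int), Dom_analyze_even_odd nums → Pre_analyze_even_odd nums →
    Spec_analyze_even_odd nums (analyze_even_odd nums)

-- ===== LEMMAS AND PROOFS =====

-- A's min-update and max-update of the running state, isolated
def updMin (o : Option Int) (n : Int) : Option Int :=
  match o with
  | none => some n
  | some m => if n < m then some n else some m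

def updMax (o : Option Int) (n : Int) : Option Int :=
  match o with
  | none => some n
  | some m => if n > m then some n else some m

theorem aStep_eq (s : Option Int × Option Int × Int × Int) (num : Int) :
    aStep s num =
      if PySem.Int.mod num 2 == 0 then
        (updMin s.1 num, s.2.1, s.2.2.1 + 1, s.2.2.2)
      else
        (s.1, updMax s.2.1 num, s.2.2.1, s.2.2.2 + 1) := by
  obtain ⟨pe, po, cp, cd⟩ := s
  simp [aStep, updMin, updMax]

-- A's loop over nums equals the reductions over the even/odd partition
theorem loop_partition (nums : List Int) (pe po : Option Int) (cp cd : Int) :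
    nums.foldl aStep (pe, po, cp, cd) =
      ((nums.filter (fun x => PySem.Int.mod x 2 == 0)).foldl updMin pe,
       (nums.filter (fun x => !(PySem.Int.mod x 2 == 0))).foldl updMax po,
       cp + ((nums.filter (fun x => PySem.Int.mod x 2 == 0)).length : Int),
       cd + ((nums.filter (fun x => !(PySem.Int.mod x 2 == 0))).length : Int)) := by
  induction nums generalizing pe po cp cd with
  | nil => simp
  | cons h t ih =>
    simp only [List.foldl_cons, aStep_eq, List.filter_cons]
    by_cases hd : (PySem.Int.mod h 2 == 0) = true
    · simp only [hd, Bool.not_true, reduceIte]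
      rw [ih, List.foldl_cons]
      simp only [Prod.mk.injEq, List.length_cons]
      and_intros
      all_goals first | rfl | (push_cast; try omega)
    · simp only [Bool.not_eq_true] at hd
      simp only [hd, Bool.not_false, reduceIte]
      rw [ih, List.foldl_cons]
      simp only [Prod.mk.injEq, List.length_cons]
      and_intros
      all_goals first | rfl | (push_cast; try omega)

theorem foldl_updMin_some (t : List Int) (a : Int) :
    t.foldl updMin (some a) = some (t.foldl min a) := by
  induction t generalizing a with
  | nil => rfl
  | cons h t ih =>
    simp only [List.foldl_cons]
    have hu : updMin (some a) h = some (min a h) := by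
      simp only [updMin]
      split_ifs with hlt
      · simp [min_eq_right hlt.le]
      · simp [min_eq_left (not_lt.mp hlt)]
    rw [hu, ih]

theorem foldl_updMax_some (t : List Int) (a : Int) :
    t.foldl updMax (some a) = some (t.foldl max a) := by
  induction t generalizing a with
  | nil => rfl
  | cons h t ih =>
    simp only [List.foldl_cons]
    have hu : updMax (some a) h = some (max a h) := by
      simp only [updMax]
      split_ifs with hlt
      · simp [max_eq_right hlt.le]
      · simp [max_eq_left (not_lt.mp hlt)]
    rw [hu, ih]

theorem foldl_updMin_none (xs : List Int) :
    xs.foldl updMin none = PySem.List.min? xs (fun x => x) := by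
  cases xs with
  | nil => rfl
  | cons h t =>
    simp only [List.foldl_cons, updMin, PySem.List.min?_id_cons]
    exact foldl_updMin_some t h

theorem foldl_updMax_none (xs : List Int) :
    xs.foldl updMax none = PySem.List.max? xs (fun x => x) := by
  cases xs with
  | nil => rfl
  | cons h t =>
    simp only [List.foldl_cons, updMax, PySem.List.max?_id_cons]
    exact foldl_updMax_some t h

-- ===== VERDICT (by name: the statement is the Claim_ definition above) =====
theorem analyze_even_odd_spec : Claim_equal_analyze_even_odd := by
  intro nums _ hpre
  unfold Spec_analyze_even_odd analyze_even_odd analyze_even_odd_alt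
  simp only [if_neg hpre, loop_partition, foldl_updMin_none, foldl_updMax_none]
  norm_num
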